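-- pv_equiv track=rewrite | github.com/kelvinhuang0327/number-pattern-research | lottery_api/models/advanced_strategies.py | cycle_aware_filter
-- ===== SOURCE A (Python) =====
-- from typing import List, Dict, Tuple, Optional
--
-- def cycle_aware_filter(history: List[Dict], candidates: List[int], max_num: int) -> List[int]:
--     """週期感知過濾：移除長時間未出現且無回暖跡象的號碼"""
--     if not history: return candidates
--
--     last_seen = {i: -1 for i in range(1, max_num + 1)}
--     for i, draw in enumerate(reversed(history)):
--         for n in draw['numbers']:
--             if last_seen[n] == -1:
--                 last_seen[n] = i
--
--     filtered = []
--     for n in candidates: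
--         gap = last_seen.get(n, 100)
--         if gap < 25: # 活躍或近期出現
--             filtered.append(n)
--         elif gap > 40: # 已「滅絕」的號碼
--             continue
--         else: # 25-40: 處於危險期，但保留作為冷號可能
--             filtered.append(n)
--     return filtered
-- ===== SOURCE B (Python) =====
-- def cycle_aware_filter(history, candidates, max_num):
--     """週期感知過濾 via two sets: numbers seen in the last 41 draws vs earlier draws."""
--     if not history:
--         return candidates
--     recent = {n for draw in history[-41:] for n in draw['numbers']}
--     older = {n for draw in history[:-41] for n in draw['numbers']}
--     return [n for n in candidates
--             if 1 <= n <= max_num and (n in recent or n not in older)]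
-- ===== Notes on version B (the rewrite author's own statement) =====
-- stated objective: simpler
-- what changed: Replaces the per-number last-seen-index dictionary (initialised for all 1..max_num and updated over enumerate(reversed(history))) and the 25/40 gap thresholds by two set comprehensions over the list slices history[-41:] and history[:-41], keeping a candidate iff it is in range and not seen only in the older part.
-- outside the precondition, e.g. on cycle_aware_filter([{'numbers': [99]}], [1], 10): A raises KeyError, B returns [1]
-- crash fix: On a non-empty history whose draws all have a 'numbers' key but contain a number outside 1..max_num, A raises KeyError while B returns the normally filtered candidate list. — e.g. on cycle_aware_filter([[("numbers", [99])]], [1], 10): A raises KeyError, B returns [1]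
import Mathlib
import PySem

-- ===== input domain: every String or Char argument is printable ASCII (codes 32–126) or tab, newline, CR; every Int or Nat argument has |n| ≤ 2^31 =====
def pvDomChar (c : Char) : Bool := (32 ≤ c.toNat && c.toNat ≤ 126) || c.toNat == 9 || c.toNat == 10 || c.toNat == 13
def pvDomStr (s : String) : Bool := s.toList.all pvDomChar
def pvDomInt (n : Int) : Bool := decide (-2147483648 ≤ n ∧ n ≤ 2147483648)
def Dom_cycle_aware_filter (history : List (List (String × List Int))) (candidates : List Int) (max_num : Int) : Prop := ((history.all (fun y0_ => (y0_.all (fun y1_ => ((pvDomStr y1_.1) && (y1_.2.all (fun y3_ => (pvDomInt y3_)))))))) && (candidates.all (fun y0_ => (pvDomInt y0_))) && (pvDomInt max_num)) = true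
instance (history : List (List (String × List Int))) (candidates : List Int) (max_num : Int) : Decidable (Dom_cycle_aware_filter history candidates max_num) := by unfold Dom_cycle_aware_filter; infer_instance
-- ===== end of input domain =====

-- B replaces A's last-seen-index dictionary and gap thresholds by two sets built from the
-- slices history[-41:] and history[:-41]; objective: simpler.

-- draw['numbers'] as Python computes it when the key is present (getD [] only on inputs
-- Pre_/Raises_ handle; both ports use the same access)
def pvNums (draw : List (String × List Int)) : List Int :=
  ((PySem.Dict.mk draw).get? "numbers").getD []

-- ===== PORT A =====
def cycle_aware_filter (history : List (List (String × List Int))) (candidates : List Int) (max_num : Int) : List Int :=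
  if history = [] then candidates
  else
    let init : PySem.Dict Int Int :=
      (PySem.List.pyRange 1 (max_num + 1) 1).foldl (fun d i => d.insert i (-1)) PySem.Dict.empty
    let last_seen : PySem.Dict Int Int :=
      (PySem.List.enumerate history.reverse 0).foldl
        (fun d p =>
          (pvNums p.2).foldl
            (fun d n => if d.getD n 0 = -1 then d.insert n p.1 else d) d)
        init
    candidates.foldl
      (fun acc n =>
        let gap := last_seen.getD n 100
        if gap < 25 then acc ++ [n]
        else if gap > 40 then acc
        else acc ++ [n]) []

-- ===== PORT B =====
def cycle_aware_filter_alt (history : List (List (String × List Int))) (candidates : List Int) (max_num : Int) : List Int :=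
  if history = [] then candidates
  else
    let recent : PySem.Set Int :=
      PySem.Set.ofList ((PySem.List.slice history (some (-41)) none).flatMap pvNums)
    let older : PySem.Set Int :=
      PySem.Set.ofList ((PySem.List.slice history none (some (-41))).flatMap pvNums)
    candidates.filter (fun n =>
      decide (1 ≤ n) && decide (n ≤ max_num) &&
        (PySem.Set.contains recent n || !PySem.Set.contains older n))

-- ===== PRECONDITION & SPEC =====
-- Pre_ excludes exactly the inputs where Python A raises KeyError: a non-empty history with a
-- draw missing the 'numbers' key, or containing a number outside 1..max_num.
def Pre_cycle_aware_filter (history : List (List (String × List Int))) (candidates : List Int) (max_num : Int) : Prop :=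
  history = [] ∨ ∀ draw ∈ history,
    ((PySem.Dict.mk draw).get? "numbers").isSome = true ∧
    ∀ n ∈ ((PySem.Dict.mk draw).get? "numbers").getD [], 1 ≤ n ∧ n ≤ max_num
instance (history : List (List (String × List Int))) (candidates : List Int) (max_num : Int) : Decidable (Pre_cycle_aware_filter history candidates max_num) := by unfold Pre_cycle_aware_filter; infer_instance

def pvWitness_cycle_aware_filter : (List (List (String × List Int))) × List Int × Int :=
  ([[("numbers", [1, 3])]], [1, 2, 3, 9], 5)

-- On a non-empty history whose draws all have a 'numbers' key but contain a number outside
-- 1..max_num, A raises KeyError while B returns the normally filtered candidate list.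
def Raises_cycle_aware_filter (history : List (List (String × List Int))) (candidates : List Int) (max_num : Int) : Prop :=
  history ≠ [] ∧
  (∀ draw ∈ history, ((PySem.Dict.mk draw).get? "numbers").isSome = true) ∧
  ∃ draw ∈ history, ∃ n ∈ ((PySem.Dict.mk draw).get? "numbers").getD [], ¬(1 ≤ n ∧ n ≤ max_num)
instance (history : List (List (String × List Int))) (candidates : List Int) (max_num : Int) : Decidable (Raises_cycle_aware_filter history candidates max_num) := by unfold Raises_cycle_aware_filter; infer_instance

def pvRaiseWitness_cycle_aware_filter : (List (List (String × List Int))) × List Int × Int :=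
  ([[("numbers", [99])]], [1], 10)
def pvRaiseWitnessOut_cycle_aware_filter : List Int := [1]

def Spec_cycle_aware_filter (history : List (List (String × List Int))) (candidates : List Int) (max_num : Int) (out : List Int) : Prop := out = cycle_aware_filter_alt history candidates max_num
instance (history : List (List (String × List Int))) (candidates : List Int) (max_num : Int) (out : List Int) : Decidable (Spec_cycle_aware_filter history candidates max_num out) := by unfold Spec_cycle_aware_filter; infer_instance

-- ===== CLAIM (what is proved, stated in full; the proofs are below) =====
def Claim_equal_cycle_aware_filter : Prop := ∀ (history : List (List (String × List Int))) (candidates : List Int) (max_num : Int), Dom_cycle_aware_filter history candidates max_num → Pre_cycle_aware_filter history candidates max_num → Spec_cycle_aware_filter history candidates max_num (cycle_aware_filter history candidates max_num)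
def Claim_raises_cycle_aware_filter : Prop := (∀ (history : List (List (String × List Int))) (candidates : List Int) (max_num : Int), Dom_cycle_aware_filter history candidates max_num → Raises_cycle_aware_filter history candidates max_num → ¬ Pre_cycle_aware_filter history candidates max_num) ∧ (Dom_cycle_aware_filter (pvRaiseWitness_cycle_aware_filter.1) (pvRaiseWitness_cycle_aware_filter.2.1) (pvRaiseWitness_cycle_aware_filter.2.2) ∧ Raises_cycle_aware_filter (pvRaiseWitness_cycle_aware_filter.1) (pvRaiseWitness_cycle_aware_filter.2.1) (pvRaiseWitness_cycle_aware_filter.2.2) ∧ cycle_aware_filter_alt (pvRaiseWitness_cycle_aware_filter.1) (pvRaiseWitness_cycle_aware_filter.2.1) (pvRaiseWitness_cycle_aware_filter.2.2) = pvRaiseWitnessOut_cycle_aware_filter)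

-- ===== LEMMAS AND PROOFS =====

-- index (counting from s) of the first element of l whose 'numbers' contain m; -1 if none
def pvGapFrom (s : Int) (l : List (List (String × List Int))) (m : Int) : Int :=
  match l with
  | [] => -1
  | dr :: rest => if m ∈ pvNums dr then s else pvGapFrom (s + 1) rest m

-- the {i: -1 for i in range(1, max_num+1)} comprehension
lemma pv_init_get (l : List Int) (d : PySem.Dict Int Int) (n : Int) :
    ((l.foldl (fun d i => d.insert i (-1)) d).get? n) = if n ∈ l then some (-1) else d.get? n := by
  induction l generalizing d with
  | nil => simp
  | cons i l ih =>
    simp only [List.foldl_cons, ih, PySem.Dict.get?_insert, List.mem_cons]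
    split_ifs <;> simp_all
-- the inner 'for n in draw["numbers"]' loop of A
lemma pv_inner_get (i m : Int) (hi : 0 ≤ i) :
    ∀ (ns : List Int) (d : PySem.Dict Int Int),
    ((ns.foldl (fun d n => if d.getD n 0 = -1 then d.insert n i else d) d).get? m) =
      if m ∈ ns ∧ d.get? m = some (-1) then some i else d.get? m := by
  intro ns
  induction ns with
  | nil => simp
  | cons n ns ih =>
    intro d
    simp only [List.foldl_cons]
    rw [PySem.Dict.getD_eq_get?_getD]
    by_cases hn : d.get? n = some (-1)
    · rw [if_pos (by simp [hn])]
      rw [ih]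
      simp only [PySem.Dict.get?_insert, List.mem_cons]
      by_cases hmn : m = n
      · subst hmn
        simp only [true_or, hn, and_true]
        rw [if_neg (by rintro ⟨-, h⟩; simp at h; omega), if_pos trivial]
      · simp [hmn]
    · rw [if_neg (by cases h : d.get? n <;> simp_all)]
      rw [ih]
      by_cases hmn : m = n
      · subst hmn
        simp only [List.mem_cons]
        by_cases hm : d.get? m = some (-1)
        · exact absurd hm hn
        · simp [hm]
      · simp [hmn]

-- the outer 'for i, draw in enumerate(reversed(history))' loop of A
lemma pv_outer_get (m : Int) :
    ∀ (l : List (List (String × List Int))) (s : Int) (d : PySem.Dict Int Int), 0 ≤ s →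
    (((PySem.List.enumerate l s).foldl
        (fun d p => (pvNums p.2).foldl
          (fun d n => if d.getD n 0 = -1 then d.insert n p.1 else d) d) d).get? m) =
      if d.get? m = some (-1) then some (pvGapFrom s l m) else d.get? m := by
  intro l
  induction l with
  | nil => intro s d _; simp [PySem.List.enumerate_nil, pvGapFrom]
  | cons dr rest ih =>
    intro s d hs
    rw [PySem.List.enumerate_cons, List.foldl_cons]
    rw [ih (s + 1) _ (by omega)]
    rw [pv_inner_get s m hs]
    simp only [pvGapFrom]
    by_cases hd : d.get? m = some (-1) <;> by_cases hm : m ∈ pvNums dr <;>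
      simp [hd, hm, show s ≠ -1 by omega]
-- A's candidate loop keeps n exactly when its gap is not above 40
lemma pv_filterA (d : PySem.Dict Int Int) :
    ∀ (l acc : List Int),
    (l.foldl (fun acc n =>
        let gap := d.getD n 100
        if gap < 25 then acc ++ [n]
        else if gap > 40 then acc
        else acc ++ [n]) acc) =
      acc ++ l.filter (fun n => !decide (d.getD n 100 > 40)) := by
  intro l
  induction l with
  | nil => simp
  | cons n l ih =>
    intro acc
    rw [List.foldl_cons, List.filter_cons]
    by_cases h : d.getD n 100 > 40
    · simp only [h, decide_true, Bool.not_true, if_neg (by omega : ¬ d.getD n 100 < 25), ih]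
      simp
    · simp only [h, decide_false, Bool.not_false, if_true]
      by_cases h2 : d.getD n 100 < 25
      · simp [h2, ih]
      · simp [h2, ih]
-- the gap is ≤ 40 iff m occurs in the first 41 - s draws of l, or nowhere in l
lemma pv_gapFrom_le40 (m : Int) :
    ∀ (l : List (List (String × List Int))) (s : Nat),
    pvGapFrom (s : Int) l m ≤ 40 ↔
      ((s ≤ 40 ∧ ∃ dr ∈ l.take (41 - s), m ∈ pvNums dr) ∨ ∀ dr ∈ l, m ∉ pvNums dr) := by
  intro l
  induction l with
  | nil => intro s; simp [pvGapFrom]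
  | cons dr rest ih =>
    intro s
    simp only [pvGapFrom]
    by_cases hm : m ∈ pvNums dr
    · rw [if_pos hm]
      constructor
      · intro h
        have hs : s ≤ 40 := by exact_mod_cast h
        left
        refine ⟨hs, dr, ?_, hm⟩
        have : 0 < 41 - s := by omega
        cases h41 : 41 - s with
        | zero => omega
        | succ k => simp [List.take_succ_cons]
      · rintro (⟨hs, _⟩ | hall)
        · exact_mod_cast hs
        · exact absurd hm (hall dr (by simp))
    · rw [if_neg hm]
      have : ((s : Int) + 1) = ((s + 1 : Nat) : Int) := by push_cast; ring
      rw [this, ih (s + 1)]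
      constructor
      · rintro (⟨hs, dr', hdr', hm'⟩ | hall)
        · left
          refine ⟨by omega, dr', ?_, hm'⟩
          have h41 : 41 - s = (41 - (s+1)) + 1 := by omega
          rw [h41, List.take_succ_cons]
          exact List.mem_cons_of_mem _ hdr'
        · right; intro d hd; rcases List.mem_cons.1 hd with rfl | hd
          · exact hm
          · exact hall d hd
      · rintro (⟨hs, dr', hdr', hm'⟩ | hall)
        · by_cases hs40 : s = 40
          · subst hs40
            simp [List.take_succ_cons] at hdr'
            rcases hdr' with rfl
            · exact absurd hm' hm
          · left
            refine ⟨by omega, dr', ?_, hm'⟩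
            have h41 : 41 - s = (41 - (s+1)) + 1 := by omega
            rw [h41, List.take_succ_cons] at hdr'
            rcases List.mem_cons.1 hdr' with rfl | hdr'
            · exact absurd hm' hm
            · exact hdr'
        · right; intro d hd; exact hall d (List.mem_cons_of_mem _ hd)

-- ===== VERDICT (by name: the statement is the Claim_ definition above) =====
theorem cycle_aware_filter_spec : Claim_equal_cycle_aware_filter := by
  intro history candidates max_num _ _
  unfold Spec_cycle_aware_filter
  by_cases hh : history = []
  · simp [cycle_aware_filter, cycle_aware_filter_alt, hh]
  · simp only [cycle_aware_filter, cycle_aware_filter_alt, if_neg hh]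
    rw [pv_filterA, List.nil_append]
    apply List.filter_congr
    intro n _
    rw [PySem.Dict.getD_eq_get?_getD,
      pv_outer_get n history.reverse 0 _ (le_refl 0),
      pv_init_get, PySem.Dict.get?_empty]
    rw [PySem.List.slice_from_neg_ofNat history 41 (by norm_num),
      PySem.List.slice_to_neg_ofNat history 41 (by norm_num)]
    have hrec : PySem.Set.contains (PySem.Set.ofList ((history.drop (history.length - 41)).flatMap pvNums)) n = true
        ↔ ∃ dr ∈ history.drop (history.length - 41), n ∈ pvNums dr := by
      rw [PySem.Set.contains_iff, PySem.Set.mem_ofList, List.mem_flatMap]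
    have hold : PySem.Set.contains (PySem.Set.ofList ((history.take (history.length - 41)).flatMap pvNums)) n = true
        ↔ ∃ dr ∈ history.take (history.length - 41), n ∈ pvNums dr := by
      rw [PySem.Set.contains_iff, PySem.Set.mem_ofList, List.mem_flatMap]
    by_cases hmem : n ∈ PySem.List.pyRange 1 (max_num + 1) 1
    · have hr := (PySem.List.mem_pyRange_one).1 hmem
      simp only [if_pos hmem]
      have h1 : decide (1 ≤ n) = true := by simp [hr.1]
      have h2 : decide (n ≤ max_num) = true := by simp; omega
      rw [h1, h2]
      simp only [Bool.true_and]
      rw [Bool.eq_iff_iff]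
      simp only [Bool.not_eq_true', Bool.or_eq_true, decide_eq_false_iff_not, not_lt, gt_iff_lt]
      have hgap := pv_gapFrom_le40 n history.reverse 0
      norm_num at hgap
      rw [← Bool.not_eq_true _]
      rw [hrec, hold]
      simp only [if_true, Option.getD_some]
      rw [hgap]
      have htk : (∃ dr ∈ history.reverse.take 41, n ∈ pvNums dr)
          ↔ ∃ dr ∈ history.drop (history.length - 41), n ∈ pvNums dr := by
        rw [List.take_reverse]
        constructor
        · rintro ⟨dr, hdr, hn⟩; exact ⟨dr, List.mem_reverse.1 hdr, hn⟩
        · rintro ⟨dr, hdr, hn⟩; exact ⟨dr, List.mem_reverse.2 hdr, hn⟩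
      have hsplit : (∀ dr ∈ history, n ∉ pvNums dr)
          ↔ (¬ ∃ dr ∈ history.take (history.length - 41), n ∈ pvNums dr)
            ∧ ¬ ∃ dr ∈ history.drop (history.length - 41), n ∈ pvNums dr := by
        constructor
        · intro hall
          constructor
          · rintro ⟨dr, hdr, hn⟩
            exact hall dr (List.mem_of_mem_take hdr) hn
          · rintro ⟨dr, hdr, hn⟩
            exact hall dr (List.mem_of_mem_drop hdr) hn
        · rintro ⟨ha, hb⟩ dr hdr hn
          rcases List.mem_append.1 (by rw [List.take_append_drop] ; exact hdr :
              dr ∈ history.take (history.length - 41) ++ history.drop (history.length - 41)) with h | h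
          · exact ha ⟨dr, h, hn⟩
          · exact hb ⟨dr, h, hn⟩
      rw [htk, hsplit]
      constructor
      · rintro (h | ⟨h1, -⟩)
        · exact Or.inl h
        · exact Or.inr h1
      · rintro (h | h1)
        · exact Or.inl h
        · by_cases hA : ∃ dr ∈ history.drop (history.length - 41), n ∈ pvNums dr
          · exact Or.inl hA
          · exact Or.inr ⟨h1, hA⟩
    · simp only [if_neg hmem]
      rw [PySem.List.mem_pyRange_one] at hmem
      simp only [if_neg (by simp : ¬ (none : Option Int) = some (-1)), Option.getD_none]
      rw [Bool.eq_iff_iff]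
      simp only [Bool.not_eq_true', Bool.and_eq_true, Bool.or_eq_true,
        decide_eq_false_iff_not, decide_eq_true_eq, not_lt]
      constructor
      · intro h; exact absurd h (by norm_num)
      · rintro ⟨⟨ha, hb⟩, -⟩; exact absurd (by omega : n < max_num + 1) (by omega)

@[simp] theorem cycle_aware_filter_raises : Claim_raises_cycle_aware_filter := by
  unfold Claim_raises_cycle_aware_filter
  constructor
  · rintro history candidates max_num - ⟨hne, -, dr, hdr, n, hn, hout⟩ hp
    rcases hp with rfl | hp
    · exact hne rfl
    · exact hout ((hp dr hdr).2 n hn)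
  · exact ⟨by decide, by decide, by decide⟩
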